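-- pv_equiv track=rewrite | github.com/wovenmind-workspaces/pykg2vec | pykg2vec/utils/evaluation.py | eval_batch_head
-- ===== SOURCE A (Python) =====
-- def eval_batch_head(id_replace_head, h, r, t, tr_h):
--     hrank = 0
--     fhrank = 0
--
--     for j in range(len(id_replace_head)):
--         val = id_replace_head[-j - 1]
--         if val == h:
--             break
--         else:
--             hrank += 1
--             fhrank += 1
--             if val in tr_h[(t, r)]:
--                 fhrank -= 1
--
--     return hrank, fhrank
-- ===== SOURCE B (Python) =====
-- def eval_batch_head(id_replace_head, h, r, t, tr_h):
--     tail = []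
--     for v in id_replace_head:
--         if v == h:
--             tail = []
--         else:
--             tail.append(v)
--     hrank = len(tail)
--     fhrank = sum(1 for v in tail if v not in tr_h[(t, r)])
--     return hrank, fhrank
-- ===== Notes on version B (the rewrite author's own statement) =====
-- stated objective: alternative
-- what changed: Replaces A's backward scan that breaks at the first h from the end with two stages: a forward pass that resets an accumulator at every h, leaving exactly the suffix after the last h, and then a separate membership count over that suffix.
import Mathlib
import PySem

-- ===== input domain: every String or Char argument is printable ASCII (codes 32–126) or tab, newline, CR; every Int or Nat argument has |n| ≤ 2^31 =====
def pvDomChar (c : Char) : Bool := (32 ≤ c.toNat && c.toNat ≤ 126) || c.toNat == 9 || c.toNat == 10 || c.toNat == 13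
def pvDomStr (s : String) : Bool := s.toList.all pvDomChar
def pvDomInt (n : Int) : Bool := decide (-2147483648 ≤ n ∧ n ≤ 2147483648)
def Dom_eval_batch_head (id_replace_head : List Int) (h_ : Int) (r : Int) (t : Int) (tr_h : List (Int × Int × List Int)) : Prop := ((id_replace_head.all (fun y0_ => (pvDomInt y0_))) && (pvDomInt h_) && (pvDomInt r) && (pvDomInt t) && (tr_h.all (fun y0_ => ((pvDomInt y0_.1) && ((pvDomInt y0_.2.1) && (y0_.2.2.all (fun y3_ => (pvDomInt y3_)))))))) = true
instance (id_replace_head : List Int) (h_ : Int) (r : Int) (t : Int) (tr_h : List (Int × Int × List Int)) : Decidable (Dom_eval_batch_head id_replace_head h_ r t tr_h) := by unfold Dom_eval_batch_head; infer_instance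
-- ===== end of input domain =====

-- B replaces A's backward scan-with-break by a forward reset pass that keeps the suffix after the last h, then a separate membership count; objective: alternative (same cost).
-- ===== PORT A =====
-- first-match lookup of key (t, r) in the dict tr_h (Python's tr_h[(t, r)]; none = KeyError)
def lookupTR (tr_h : List (Int × Int × List Int)) (t r : Int) : Option (List Int) :=
  match tr_h with
  | [] => none
  | (a, b, vs) :: rest => if a = t ∧ b = r then some vs else lookupTR rest t r

-- Python's 'val in tr_h[(t, r)]'; a missing key (Python KeyError) yields false here —
-- exactly those inputs are excluded by Pre_eval_batch_head
def inTR (tr_h : List (Int × Int × List Int)) (t r : Int) (v : Int) : Bool :=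
  match lookupTR tr_h t r with
  | some vs => decide (v ∈ vs)
  | none => false

-- the for-loop of A over j ∈ range(len); 'break' returns the accumulators
def evalAGo (xs : List Int) (h_ t r : Int) (tr_h : List (Int × Int × List Int)) :
    List Nat → Int → Int → Int × Int
  | [], hrank, fhrank => (hrank, fhrank)
  | j :: js, hrank, fhrank =>
    match PySem.List.pyGet? xs (-(j : Int) - 1) with
    | none => (hrank, fhrank)  -- unreachable: j < len(xs)
    | some val =>
      if val = h_ then (hrank, fhrank)
      else
        let hrank' := hrank + 1
        let fhrank' := fhrank + 1
        let fhrank'' := if inTR tr_h t r val then fhrank' - 1 else fhrank'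
        evalAGo xs h_ t r tr_h js hrank' fhrank''

def eval_batch_head (id_replace_head : List Int) (h_ : Int) (r : Int) (t : Int) (tr_h : List (Int × Int × List Int)) : Int × Int :=
  evalAGo id_replace_head h_ t r tr_h (List.range id_replace_head.length) 0 0

-- ===== PORT B =====
def eval_batch_head_alt (id_replace_head : List Int) (h_ : Int) (r : Int) (t : Int) (tr_h : List (Int × Int × List Int)) : Int × Int :=
  -- forward pass: reset the accumulator at every h, append otherwise — leaves the suffix after the last h
  let tail := id_replace_head.foldl (fun acc v => if v = h_ then ([] : List Int) else acc ++ [v]) []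
  let hrank : Int := (tail.length : Int)
  -- 'v not in tr_h[(t, r)]': on a missing key Python raises KeyError (tail nonempty) — excluded by Pre_eval_batch_head
  let fhrank : Int := ((tail.filter (fun v => !(inTR tr_h t r v))).length : Int)
  (hrank, fhrank)

-- ===== PRECONDITION & SPEC =====
-- Pre_ excludes exactly the inputs where both Pythons raise KeyError: a non-h element follows the
-- last h (list nonempty and its last element ≠ h_) while the key (t, r) is missing from tr_h.
def Pre_eval_batch_head (id_replace_head : List Int) (h_ : Int) (r : Int) (t : Int) (tr_h : List (Int × Int × List Int)) : Prop :=
  id_replace_head = [] ∨ id_replace_head.getLast? = some h_ ∨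
    tr_h.any (fun e => e.1 == t && e.2.1 == r) = true
instance (id_replace_head : List Int) (h_ : Int) (r : Int) (t : Int) (tr_h : List (Int × Int × List Int)) : Decidable (Pre_eval_batch_head id_replace_head h_ r t tr_h) := by unfold Pre_eval_batch_head; infer_instance

def pvWitness_eval_batch_head : List Int × Int × Int × Int × (List (Int × Int × List Int)) :=
  ([1, 2, 3], 2, 0, 1, [(1, 0, [1, 5])])

def Spec_eval_batch_head (id_replace_head : List Int) (h_ : Int) (r : Int) (t : Int) (tr_h : List (Int × Int × List Int)) (out : Int × Int) : Prop := out = eval_batch_head_alt id_replace_head h_ r t tr_h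
instance (id_replace_head : List Int) (h_ : Int) (r : Int) (t : Int) (tr_h : List (Int × Int × List Int)) (out : Int × Int) : Decidable (Spec_eval_batch_head id_replace_head h_ r t tr_h out) := by unfold Spec_eval_batch_head; infer_instance

-- ===== CLAIM (what is proved, stated in full; the proofs are below) =====
def Claim_equal_eval_batch_head : Prop := ∀ (id_replace_head : List Int) (h_ : Int) (r : Int) (t : Int) (tr_h : List (Int × Int × List Int)), Dom_eval_batch_head id_replace_head h_ r t tr_h → Pre_eval_batch_head id_replace_head h_ r t tr_h → Spec_eval_batch_head id_replace_head h_ r t tr_h (eval_batch_head id_replace_head h_ r t tr_h)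

-- ===== LEMMAS AND PROOFS =====

-- A's loop, re-expressed as structural recursion on the reversed list
def goList (h_ t r : Int) (tr_h : List (Int × Int × List Int)) :
    List Int → Int → Int → Int × Int
  | [], a, b => (a, b)
  | v :: vs, a, b =>
    if v = h_ then (a, b)
    else goList h_ t r tr_h vs (a + 1) (b + 1 - (if inTR tr_h t r v then 1 else 0))

theorem evalAGo_eq_goList (xs : List Int) (h_ t r : Int) (tr_h : List (Int × Int × List Int)) :
    ∀ (m k : Nat) (a b : Int), k + m = xs.length →
      evalAGo xs h_ t r tr_h (List.range' k m) a b =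
      goList h_ t r tr_h (xs.reverse.drop k) a b := by
  intro m
  induction m with
  | zero =>
    intro k a b hk
    have : xs.reverse.drop k = [] := by
      apply List.drop_eq_nil_of_le; simp; omega
    simp [List.range', evalAGo, this, goList]
  | succ n ih =>
    intro k a b hk
    have hklt : k < xs.length := by omega
    have hget : PySem.List.pyGet? xs (-(k : Int) - 1) = some (xs.reverse[k]'(by simpa using hklt)) := by
      have h1 : (-(k : Int) - 1) = -(((k + 1 : Nat)) : Int) := by push_cast; ring
      rw [h1, PySem.List.pyGet?_neg_natCast xs (k + 1) (by omega) (by omega)]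
      rw [List.getElem?_eq_getElem (by omega)]
      congr 1
      rw [List.getElem_reverse]
      congr 1
      omega
    have hdrop : xs.reverse.drop k = xs.reverse[k]'(by simpa using hklt) :: xs.reverse.drop (k + 1) := by
      exact (List.drop_eq_getElem_cons (by simpa using hklt))
    rw [List.range'_succ]
    rw [hdrop]
    simp only [evalAGo, hget, goList]
    by_cases hv : xs.reverse[k]'(by simpa using hklt) = h_
    · simp [hv]
    · rw [if_neg hv, if_neg hv]
      by_cases hm : inTR tr_h t r (xs.reverse[k]'(by simpa using hklt)) = true
      · rw [if_pos hm, if_pos hm]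
        have e1 : b + 1 - (1 : Int) = b := by ring
        rw [e1]
        exact ih (k + 1) (a + 1) b (by omega)
      · rw [if_neg hm, if_neg hm]
        have e2 : b + 1 - (0 : Int) = b + 1 := by ring
        rw [e2]
        exact ih (k + 1) (a + 1) (b + 1) (by omega)

-- position of the first h in l (= len if absent): A's rank over the reversed list
def hrankOf (h_ : Int) (l : List Int) : Nat :=
  match PySem.List.index? l h_ with
  | some i => i
  | none => l.length

theorem goList_spec (h_ t r : Int) (tr_h : List (Int × Int × List Int)) :
    ∀ (l : List Int) (a b : Int),
      goList h_ t r tr_h l a b =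
        (a + (hrankOf h_ l : Int),
         b + (hrankOf h_ l : Int) -
           (((l.take (hrankOf h_ l)).filter (inTR tr_h t r)).length : Int)) := by
  intro l
  induction l with
  | nil => intro a b; simp [goList, hrankOf, PySem.List.index?]
  | cons v vs ih =>
    intro a b
    by_cases hv : v = h_
    · subst hv
      have h0 : hrankOf v (v :: vs) = 0 := by
        unfold hrankOf
        rw [PySem.List.index?_cons_self]
      simp [goList, h0]
    · have hr : hrankOf h_ (v :: vs) = hrankOf h_ vs + 1 := by
        unfold hrankOf
        rw [PySem.List.index?_cons_of_ne vs hv]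
        cases PySem.List.index? vs h_ <;> simp
      rw [goList, if_neg hv, ih, hr]
      by_cases hm : inTR tr_h t r v = true <;>
        simp [hm, Prod.mk.injEq] <;> omega

-- B's forward reset pass yields exactly the prefix of the reversed list before its first h, reversed
theorem foldTail_spec (h_ : Int) :
    ∀ (l : List Int),
      l.foldl (fun acc v => if v = h_ then ([] : List Int) else acc ++ [v]) [] =
        (l.reverse.take (hrankOf h_ l.reverse)).reverse := by
  intro l
  induction l using List.reverseRecOn with
  | nil => simp [hrankOf, PySem.List.index?]
  | append_singleton ys x ih =>
    rw [List.foldl_append, List.foldl_cons, List.foldl_nil, ih]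
    have hrev : (ys ++ [x]).reverse = x :: ys.reverse := by simp
    by_cases hx : x = h_
    · subst hx
      have h0 : hrankOf x (x :: ys.reverse) = 0 := by
        unfold hrankOf
        rw [PySem.List.index?_cons_self]
      simp [hrev, h0]
    · have hr : hrankOf h_ (x :: ys.reverse) = hrankOf h_ ys.reverse + 1 := by
        unfold hrankOf
        rw [PySem.List.index?_cons_of_ne ys.reverse hx]
        cases PySem.List.index? ys.reverse h_ <;> simp
      rw [hrev, hr]
      simp [hx]

theorem hrankOf_le (h_ : Int) (l : List Int) : hrankOf h_ l ≤ l.length := by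
  induction l with
  | nil => simp [hrankOf, PySem.List.index?]
  | cons v vs ih =>
    by_cases hv : v = h_
    · subst hv
      unfold hrankOf
      rw [PySem.List.index?_cons_self]
      simp
    · unfold hrankOf at ih ⊢
      rw [PySem.List.index?_cons_of_ne vs hv]
      cases h : PySem.List.index? vs h_ <;> rw [h] at ih <;> simp; omega

theorem length_filter_not (p : Int → Bool) (l : List Int) :
    (l.filter (fun v => !(p v))).length + (l.filter p).length = l.length := by
  induction l with
  | nil => simp
  | cons v vs ih =>
    by_cases hp : p v = true <;> simp [hp] <;> omega

-- ===== VERDICT (by name: the statement is the Claim_ definition above) =====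
theorem eval_batch_head_spec : Claim_equal_eval_batch_head := by
  intro xs h_ r t tr_h _ _
  unfold Spec_eval_batch_head eval_batch_head eval_batch_head_alt
  have h1 := evalAGo_eq_goList xs h_ t r tr_h xs.length 0 0 0 (by omega)
  rw [show List.range xs.length = List.range' 0 xs.length from List.range_eq_range', h1]
  simp only [List.drop_zero]
  rw [goList_spec, foldTail_spec]
  have hle : hrankOf h_ xs.reverse ≤ xs.length := by
    simpa using hrankOf_le h_ xs.reverse
  have hlen : (xs.reverse.take (hrankOf h_ xs.reverse)).length = hrankOf h_ xs.reverse := by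
    simp [List.length_take]; omega
  have hfilt := length_filter_not (inTR tr_h t r) (xs.reverse.take (hrankOf h_ xs.reverse))
  rw [hlen] at hfilt
  simp only [Prod.mk.injEq]
  refine ⟨by simp [hlen], ?_⟩
  rw [List.filter_reverse, List.length_reverse]
  omega
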